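-- pv_equiv track=rewrite | github.com/vgcman16/OpenZues | src/openzues/services/followups.py | _normalize_workspace_identity
-- ===== SOURCE A (Python) =====
-- def _normalize_workspace_identity(value: str | None) -> str | None:
--     normalized = str(value or "").strip()
--     if not normalized:
--         return None
--     while "\\\\" in normalized:
--         normalized = normalized.replace("\\\\", "\\")
--     normalized = normalized.replace("/", "\\")
--     return normalized.lower()
-- ===== SOURCE B (Python) =====
-- def _normalize_workspace_identity(value):
--     normalized = str(value or "").strip()
--     if not normalized:
--         return None
--     out = []
--     prev_bs = False
--     for c in normalized:
--         if c == '\\' and prev_bs: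
--             continue
--         out.append('\\' if c == '/' else c.lower())
--         prev_bs = c == '\\'
--     return ''.join(out)
-- ===== Notes on version B (the rewrite author's own statement) =====
-- stated objective: alternative
-- what changed: A collapses runs of backslashes by re-running a whole-string pair-to-single replace until no pair remains and then does two more whole-string passes (slash mapping, lowercasing); B makes a single left-to-right pass with a previous-char-was-backslash flag that skips repeated backslashes and maps slashes and lowercases each kept character on the fly.
import Mathlib
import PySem

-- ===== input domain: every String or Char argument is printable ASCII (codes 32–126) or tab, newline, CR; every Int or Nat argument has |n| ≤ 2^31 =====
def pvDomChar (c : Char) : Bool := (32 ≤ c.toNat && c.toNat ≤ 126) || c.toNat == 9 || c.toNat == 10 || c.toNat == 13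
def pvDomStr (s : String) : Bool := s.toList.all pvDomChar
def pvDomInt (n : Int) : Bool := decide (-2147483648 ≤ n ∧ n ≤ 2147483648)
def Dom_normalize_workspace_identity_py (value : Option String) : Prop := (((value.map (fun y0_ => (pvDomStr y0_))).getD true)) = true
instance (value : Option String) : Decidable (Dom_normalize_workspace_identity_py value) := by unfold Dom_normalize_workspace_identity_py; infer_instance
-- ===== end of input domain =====

-- B replaces A's repeated whole-string pair-to-single replace passes with ONE left-to-right
-- pass that skips a backslash following a backslash and maps slashes and lowercases on the fly
-- (objective: alternative -- a single-pass algorithm instead of a fixpoint of replace passes).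

-- ===== PORT A =====
-- the `while "\\\\" in normalized:` loop; fuel = initial length makes the recursion total
-- (each replace of a present "\\" pair strictly shortens the string, proved below for the claim)
def pvCollapseLoop : Nat → String → String
  | 0, s => s
  | fuel + 1, s =>
    if PySem.Str.isIn "\\\\" s then pvCollapseLoop fuel (PySem.Str.replace s "\\\\" "\\")
    else s

def normalize_workspace_identity_py (value : Option String) : Option String :=
  let normalized := PySem.Str.strip (value.getD "")   -- str(value or "").strip()
  if normalized = "" then none
  else
    let normalized := pvCollapseLoop normalized.toList.length normalized
    let normalized := PySem.Str.replace normalized "/" "\\"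
    some (PySem.Str.lower normalized)

-- ===== PORT B =====
-- one fold over the characters; state = (out, prev_bs)
def normalize_workspace_identity_py_alt (value : Option String) : Option String :=
  let normalized := PySem.Str.strip (value.getD "")
  if normalized = "" then none
  else
    let res := normalized.toList.foldl
      (fun (st : List Char × Bool) c =>
        if c = '\\' ∧ st.2 then st
        else (st.1 ++ [if c = '/' then '\\' else PySem.Chars.lowerChar c], c == '\\'))
      ([], false)
    some (String.ofList res.1)

-- ===== PRECONDITION & SPEC =====
def Spec_normalize_workspace_identity_py (value : Option String) (out : Option String) : Prop := out = normalize_workspace_identity_py_alt value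
instance (value : Option String) (out : Option String) : Decidable (Spec_normalize_workspace_identity_py value out) := by unfold Spec_normalize_workspace_identity_py; infer_instance

-- ===== CLAIM (what is proved, stated in full; the proofs are below) =====
def Claim_equal_normalize_workspace_identity_py : Prop := ∀ (value : Option String), Dom_normalize_workspace_identity_py value → Spec_normalize_workspace_identity_py value (normalize_workspace_identity_py value)

-- ===== LEMMAS AND PROOFS =====

-- run-collapse with an initial "previous char was a backslash" flag
def pvSq : Bool → List Char → List Char
  | _, [] => []
  | b, c :: t => if c = '\\' ∧ b = true then pvSq b t else c :: pvSq (c == '\\') t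

-- one replace("\\\\","\\") pass: collapse non-overlapping pairs left to right
def pvStep : List Char → List Char
  | [] => []
  | [c] => [c]
  | c :: d :: t => if c = '\\' ∧ d = '\\' then '\\' :: pvStep t else c :: pvStep (d :: t)

theorem pvSq_cons (b : Bool) (c : Char) (t : List Char) :
    pvSq b (c :: t) = if c = '\\' ∧ b = true then pvSq b t else c :: pvSq (c == '\\') t := rfl

theorem pvStep_cons₂ (c d : Char) (t : List Char) :
    pvStep (c :: d :: t) = if c = '\\' ∧ d = '\\' then '\\' :: pvStep t else c :: pvStep (d :: t) := rfl

theorem pvGo_zero (old new l acc : List Char) :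
    PySem.Chars.replace.go old new 0 l acc = acc.reverse ++ l := by
  rw [PySem.Chars.replace.go.eq_def]

theorem pvGo_nil (old new : List Char) (fuel : Nat) (acc : List Char) :
    PySem.Chars.replace.go old new fuel [] acc = acc.reverse := by
  rw [PySem.Chars.replace.go.eq_def]; cases fuel <;> simp

theorem pvGo_cons (old new : List Char) (fuel : Nat) (c : Char) (t acc : List Char) :
    PySem.Chars.replace.go old new (fuel + 1) (c :: t) acc =
      if old.isPrefixOf (c :: t) = true then
        PySem.Chars.replace.go old new fuel (List.drop old.length (c :: t)) (new.reverse ++ acc)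
      else PySem.Chars.replace.go old new fuel t (c :: acc) := by
  rw [PySem.Chars.replace.go.eq_def]

theorem pvGo_pair (fuel : Nat) (l acc : List Char) (h : l.length ≤ fuel) :
    PySem.Chars.replace.go ['\\', '\\'] ['\\'] fuel l acc = acc.reverse ++ pvStep l := by
  induction fuel generalizing l acc with
  | zero =>
    have hl : l = [] := List.length_eq_zero_iff.mp (Nat.le_zero.mp h)
    subst hl; rw [pvGo_zero]; simp [pvStep]
  | succ fuel ih =>
    match l with
    | [] => rw [pvGo_nil]; simp [pvStep]
    | [c] =>
      rw [pvGo_cons]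
      have hp : (['\\', '\\'] : List Char).isPrefixOf [c] = false := by
        rw [Bool.eq_false_iff]
        intro hpre
        have := (List.isPrefixOf_iff_prefix.mp hpre).length_le
        simp at this
      rw [if_neg (by simp [hp])]
      rw [ih [] (c :: acc) (by simp)]
      simp [pvStep]
    | c :: d :: t =>
      rw [pvGo_cons]
      by_cases hcd : c = '\\' ∧ d = '\\'
      · obtain ⟨hc, hd⟩ := hcd; subst hc; subst hd
        rw [if_pos (List.isPrefixOf_iff_prefix.mpr (by simp))]
        rw [show List.drop (['\\', '\\'] : List Char).length ('\\' :: '\\' :: t) = t from rfl]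
        rw [ih t (['\\'].reverse ++ acc) (by simp at h ⊢; omega)]
        rw [pvStep_cons₂, if_pos ⟨rfl, rfl⟩]
        simp
      · rw [if_neg (by
          intro hpre
          have hp := List.isPrefixOf_iff_prefix.mp hpre
          obtain ⟨hc, hp2⟩ := List.cons_prefix_cons.mp hp
          obtain ⟨hd, _⟩ := List.cons_prefix_cons.mp hp2
          exact hcd ⟨hc.symm, hd.symm⟩)]
        rw [ih (d :: t) (c :: acc) (by simp at h ⊢; omega)]
        rw [pvStep_cons₂, if_neg hcd]
        simp

theorem pvGo_slash (fuel : Nat) (l acc : List Char) (h : l.length ≤ fuel) :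
    PySem.Chars.replace.go ['/'] ['\\'] fuel l acc =
      acc.reverse ++ l.map (fun c => if c = '/' then '\\' else c) := by
  induction fuel generalizing l acc with
  | zero =>
    have hl : l = [] := List.length_eq_zero_iff.mp (Nat.le_zero.mp h)
    subst hl; rw [pvGo_zero]; simp
  | succ fuel ih =>
    match l with
    | [] => rw [pvGo_nil]; simp
    | c :: t =>
      rw [pvGo_cons]
      by_cases hc : c = '/'
      · subst hc
        rw [if_pos (List.isPrefixOf_iff_prefix.mpr (by simp))]
        rw [show List.drop (['/'] : List Char).length ('/' :: t) = t from rfl]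
        rw [ih t (['\\'].reverse ++ acc) (Nat.le_of_succ_le_succ h)]
        simp
      · rw [if_neg (by
          intro hpre
          have hp := List.isPrefixOf_iff_prefix.mp hpre
          obtain ⟨hc', _⟩ := List.cons_prefix_cons.mp hp
          exact hc hc'.symm)]
        rw [ih t (c :: acc) (Nat.le_of_succ_le_succ h)]
        simp [hc]

theorem pvSq_step (b : Bool) (l : List Char) : pvSq b (pvStep l) = pvSq b l := by
  induction l using pvStep.induct generalizing b with
  | case1 => rfl
  | case2 c => rfl
  | case3 c d t hcd ih =>
    obtain ⟨hc, hd⟩ := hcd; subst hc; subst hd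
    rw [pvStep_cons₂, if_pos ⟨rfl, rfl⟩]
    cases b with
    | false => simp [pvSq_cons, ih]
    | true => simp [pvSq_cons, ih]
  | case4 c d t hcd ih =>
    rw [pvStep_cons₂, if_neg hcd]
    by_cases hb : c = '\\' ∧ b = true
    · rw [pvSq_cons, if_pos hb, pvSq_cons b c (d :: t), if_pos hb]
      exact ih b
    · rw [pvSq_cons, if_neg hb, pvSq_cons b c (d :: t), if_neg hb]
      congr 1
      exact ih _

theorem pvStep_length_le (l : List Char) : (pvStep l).length ≤ l.length := by
  induction l using pvStep.induct with
  | case1 => simp [pvStep]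
  | case2 c => simp [pvStep]
  | case3 c d t hcd ih => rw [pvStep_cons₂, if_pos hcd]; simp; omega
  | case4 c d t hcd ih => rw [pvStep_cons₂, if_neg hcd]; simp at ih ⊢; omega

theorem pvStep_length_lt (l : List Char) (h : ['\\', '\\'] <:+: l) :
    (pvStep l).length < l.length := by
  induction l using pvStep.induct with
  | case1 => simp at h
  | case2 c =>
    exfalso
    have := h.length_le; simp at this
  | case3 c d t hcd ih =>
    rw [pvStep_cons₂, if_pos hcd]
    have := pvStep_length_le t
    simp; omega
  | case4 c d t hcd ih =>
    rw [pvStep_cons₂, if_neg hcd]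
    have h' : ['\\', '\\'] <:+: d :: t := by
      rcases List.infix_cons_iff.mp h with hp | hi
      · obtain ⟨hc, hp2⟩ := List.cons_prefix_cons.mp hp
        obtain ⟨hd, _⟩ := List.cons_prefix_cons.mp hp2
        exact absurd ⟨hc.symm, hd.symm⟩ hcd
      · exact hi
    have := ih h'
    simpa using Nat.succ_lt_succ this

theorem pvSq_id (b : Bool) (l : List Char) (h : ¬ ['\\', '\\'] <:+: l)
    (hb : b = true → l.head? ≠ some '\\') : pvSq b l = l := by
  induction l generalizing b with
  | nil => rfl
  | cons c t ih =>
    have hcb : ¬ (c = '\\' ∧ b = true) := by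
      rintro ⟨hc, hb'⟩
      exact (hb hb') (by simp [hc])
    rw [pvSq_cons, if_neg hcb]
    congr 1
    apply ih
    · intro hi; exact h (hi.trans (List.suffix_cons c t).isInfix)
    · intro hc'
      have hc : c = '\\' := by simpa using hc'
      intro hh
      cases t with
      | nil => simp at hh
      | cons d t' =>
        have hd : d = '\\' := by simpa using hh
        exact h (List.infix_cons_iff.mpr (Or.inl (by simp [hc, hd])))

theorem pvCollapseLoop_toList (fuel : Nat) (s : String) (h : s.toList.length ≤ fuel) :
    (pvCollapseLoop fuel s).toList = pvSq false s.toList := by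
  induction fuel generalizing s with
  | zero =>
    have hl : s.toList = [] := List.length_eq_zero_iff.mp (Nat.le_zero.mp h)
    simp [pvCollapseLoop, hl, pvSq]
  | succ fuel ih =>
    simp only [pvCollapseLoop]
    by_cases hin : PySem.Str.isIn "\\\\" s = true
    · rw [if_pos hin]
      have hinf : ['\\', '\\'] <:+: s.toList := by
        have := (PySem.Str.isIn_iff_infix "\\\\" s).mp hin
        simpa using this
      have hrep : (PySem.Str.replace s "\\\\" "\\").toList = pvStep s.toList := by
        rw [PySem.Str.toList_replace]
        show PySem.Chars.replace s.toList ['\\', '\\'] ['\\'] = pvStep s.toList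
        rw [PySem.Chars.replace]
        rw [if_neg (by simp)]
        rw [pvGo_pair s.toList.length s.toList [] (le_refl _)]
        simp
      rw [ih _ (by rw [hrep]; exact Nat.le_of_lt_succ (Nat.lt_of_lt_of_le (pvStep_length_lt _ hinf) h))]
      rw [hrep, pvSq_step]
    · rw [if_neg hin]
      have hninf : ¬ ['\\', '\\'] <:+: s.toList := by
        intro hi
        exact hin ((PySem.Str.isIn_iff_infix "\\\\" s).mpr (by simpa using hi))
      exact (pvSq_id false s.toList hninf (by simp)).symm

theorem pvFold_eq (l : List Char) (out : List Char) (b : Bool) :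
    (l.foldl
      (fun (st : List Char × Bool) c =>
        if c = '\\' ∧ st.2 then st
        else (st.1 ++ [if c = '/' then '\\' else PySem.Chars.lowerChar c], c == '\\'))
      (out, b)).1
      = out ++ (pvSq b l).map (fun c => if c = '/' then '\\' else PySem.Chars.lowerChar c) := by
  induction l generalizing out b with
  | nil => simp [pvSq]
  | cons c t ih =>
    rw [List.foldl_cons]
    by_cases hcb : c = '\\' ∧ b = true
    · rw [if_pos hcb, pvSq_cons, if_pos hcb]
      exact ih out b
    · rw [if_neg hcb, pvSq_cons, if_neg hcb]
      rw [ih]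
      simp

theorem pvLowerChar_map (u : List Char) :
    PySem.Chars.lower (u.map (fun c => if c = '/' then '\\' else c))
      = u.map (fun c => if c = '/' then '\\' else PySem.Chars.lowerChar c) := by
  rw [PySem.Chars.lower, List.map_map]
  apply List.map_congr_left
  intro c _
  by_cases hc : c = '/'
  · simp [hc]
    decide
  · simp [hc]

-- ===== VERDICT (by name: the statement is the Claim_ definition above) =====
set_option maxHeartbeats 1000000 in
theorem normalize_workspace_identity_py_spec : Claim_equal_normalize_workspace_identity_py := by
  intro value _
  unfold Spec_normalize_workspace_identity_py
  unfold normalize_workspace_identity_py normalize_workspace_identity_py_alt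
  simp only []
  by_cases h0 : PySem.Str.strip (value.getD "") = ""
  · simp [h0]
  · rw [if_neg h0, if_neg h0]
    set s := PySem.Str.strip (value.getD "") with hs
    refine congrArg some ?_
    have hloop : (pvCollapseLoop s.toList.length s).toList = pvSq false s.toList :=
      pvCollapseLoop_toList _ _ (le_refl _)
    have hrep : (PySem.Str.replace (pvCollapseLoop s.toList.length s) "/" "\\").toList
        = (pvSq false s.toList).map (fun c => if c = '/' then '\\' else c) := by
      rw [PySem.Str.toList_replace]
      show PySem.Chars.replace (pvCollapseLoop s.toList.length s).toList ['/'] ['\\']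
          = (pvSq false s.toList).map (fun c => if c = '/' then '\\' else c)
      rw [PySem.Chars.replace, if_neg (by simp),
        pvGo_slash _ _ [] (le_refl _), hloop]
      simp
    rw [show ∀ x : String, PySem.Str.lower x = String.ofList (PySem.Chars.lower x.toList)
        from fun _ => rfl]
    rw [hrep, pvLowerChar_map, pvFold_eq]
    simp
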